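-- pv_equiv track=rewrite | github.com/colding10/cp-notebook | USACO/Past Contests/Blocks/main.py | solve
-- ===== SOURCE A (Python) =====
-- def solve(blocks, word):
--     if len(word) == 0:
--         return True
--
--     letter = word[0]
--
--     for block in blocks:
--         if letter in block:
--             b = list(blocks)
--             b.remove(block)
--
--             if solve(b, word[1:]):
--                 return True
--
--     return False
-- ===== SOURCE B (Python) =====
-- def solve(blocks, word):
--     # quick infeasibility check: a letter occurring more often in the word than in
--     # the blocks (counting blocks that contain it) can never be fully matched
--     if any(word.count(c) > sum(1 for b in blocks if c in b) for c in word):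
--         return False
--
--     # Search over blocks in left-to-right order: pick an increasing sequence of
--     # block indices and assign each picked block one remaining letter, instead of
--     # recursing over word positions and removing blocks (A's strategy).
--     def go(bs, letters):
--         if not letters:
--             return True
--         for k, block in enumerate(bs):
--             for c in letters:
--                 if c in block:
--                     rem = list(letters)
--                     rem.remove(c)
--                     if go(bs[k + 1:], rem):
--                         return True
--         return False
--     return go(blocks, list(word))
-- ===== Notes on version B (the rewrite author's own statement) =====
-- stated objective: alternative
-- what changed: B first rejects words containing a letter no block contains, then searches over blocks in increasing index order, assigning each chosen block one remaining letter (recursion depth = word length), instead of A's recursion over word positions that copies and removes from the block list at every step.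
import Mathlib
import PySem

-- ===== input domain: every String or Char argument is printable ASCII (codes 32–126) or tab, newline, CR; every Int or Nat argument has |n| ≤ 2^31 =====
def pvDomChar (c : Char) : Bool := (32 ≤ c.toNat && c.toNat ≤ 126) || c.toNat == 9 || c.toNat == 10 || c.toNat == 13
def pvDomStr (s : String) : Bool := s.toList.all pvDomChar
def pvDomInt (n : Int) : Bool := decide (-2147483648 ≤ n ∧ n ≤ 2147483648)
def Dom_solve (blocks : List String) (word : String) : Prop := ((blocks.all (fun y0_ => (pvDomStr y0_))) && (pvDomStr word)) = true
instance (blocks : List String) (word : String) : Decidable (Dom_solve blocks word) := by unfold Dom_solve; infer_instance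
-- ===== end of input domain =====

-- B is an alternative search of the same exact answer: it scans blocks in increasing
-- index order assigning each chosen block one remaining letter, instead of A's
-- recursion over word positions removing blocks; equivalence is proved via a common
-- multiset-matching characterisation.

-- termination helper cited by the ports' decreasing_by
theorem pvRemove?_length_lt {letters : List Char} {c : Char} {rem : List Char}
    (h : PySem.List.remove? letters c = some rem) : rem.length < letters.length := by
  have hc : c ∈ letters := by
    by_contra hc
    rw [(PySem.List.remove?_eq_none_iff letters c).mpr hc] at h
    simp at h
  rw [PySem.List.remove?_eq_some_erase letters c hc] at h
  have hpos : 0 < letters.length := List.length_pos_of_mem hc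
  have := List.length_erase_of_mem hc
  cases h
  omega

-- ===== PORT A =====
def solveAuxA : List Char → List String → Bool
  | [], _ => true
  | letter :: w, blocks =>
      blocks.any (fun block =>
        if PySem.Chars.isIn [letter] block.toList then
          match PySem.List.remove? blocks block with
          | some b => solveAuxA w b
          | none => false
        else false)
termination_by w _ => w.length
decreasing_by simp

def solve (blocks : List String) (word : String) : Bool := solveAuxA word.toList blocks

-- ===== PORT B =====
mutual
def goB : List String → List Char → Bool
  | _, [] => true
  | bs, l :: ls => goScanB bs (l :: ls)
termination_by bs letters => (letters.length, 1, bs.length)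
decreasing_by exact Prod.Lex.right _ (Prod.Lex.left _ _ (by omega))

def goScanB : List String → List Char → Bool
  | [], _ => false
  | block :: rest, letters =>
      (letters.any (fun c =>
        if PySem.Chars.isIn [c] block.toList then
          match h : PySem.List.remove? letters c with
          | some rem => goB rest rem
          | none => false
        else false))
      || goScanB rest letters
termination_by bs letters => (letters.length, 0, bs.length)
decreasing_by
  · exact Prod.Lex.left _ _ (pvRemove?_length_lt h)
  · exact Prod.Lex.right _ (Prod.Lex.right _ (by simp))
end

def solve_alt (blocks : List String) (word : String) : Bool :=
  if word.toList.any (fun c =>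
      decide (word.toList.count c >
        (blocks.countP (fun b => PySem.Chars.isIn [c] b.toList)))) then
    false
  else
    goB blocks word.toList

-- ===== PRECONDITION & SPEC =====
def Spec_solve (blocks : List String) (word : String) (out : Bool) : Prop := out = solve_alt blocks word
instance (blocks : List String) (word : String) (out : Bool) : Decidable (Spec_solve blocks word out) := by unfold Spec_solve; infer_instance

-- ===== CLAIM (what is proved, stated in full; the proofs are below) =====
def Claim_equal_solve : Prop := ∀ (blocks : List String) (word : String), Dom_solve blocks word → Spec_solve blocks word (solve blocks word)

-- ===== LEMMAS AND PROOFS =====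

-- common characterisation: the letters can be matched to a sub-multiset of the blocks
def Q (bs : List String) (letters : List Char) : Prop :=
  ∃ t : Multiset String, t ≤ (bs : Multiset String) ∧
    Multiset.Rel (fun c b => c ∈ b.toList) (letters : Multiset Char) t

theorem isIn_singleton (c : Char) (s : List Char) :
    PySem.Chars.isIn [c] s = true ↔ c ∈ s := by
  rw [PySem.Chars.isIn_iff_infix]
  constructor
  · intro h
    exact List.singleton_sublist.mp h.sublist
  · intro h
    obtain ⟨s1, s2, rfl⟩ := List.append_of_mem h
    exact ⟨s1, s2, by simp⟩

theorem Q_nil_letters (bs : List String) : Q bs [] :=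
  ⟨0, Multiset.zero_le _, Multiset.rel_zero_left.mpr rfl⟩

theorem Q_nil_bs (letters : List Char) : Q [] letters ↔ letters = [] := by
  constructor
  · rintro ⟨t, hle, hrel⟩
    have ht : t = 0 := Multiset.le_zero.mp hle
    subst ht
    exact (Multiset.coe_eq_zero letters).mp (Multiset.rel_zero_right.mp hrel)
  · rintro rfl
    exact Q_nil_letters []

theorem le_cons_split {α : Type} [DecidableEq α] {t s : Multiset α} {a : α} :
    t ≤ a ::ₘ s ↔ t ≤ s ∨ (a ∈ t ∧ t.erase a ≤ s) := by
  constructor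
  · intro h
    by_cases ha : a ∈ t
    · refine Or.inr ⟨ha, ?_⟩
      have := Multiset.erase_le_erase a h
      rwa [Multiset.erase_cons_head] at this
    · refine Or.inl ?_
      rw [Multiset.le_iff_count] at h ⊢
      intro x
      have hx := h x
      rcases eq_or_ne x a with rfl | hne
      · simp [Multiset.count_eq_zero_of_notMem ha]
      · rwa [Multiset.count_cons_of_ne hne] at hx
  · rintro (h | ⟨ha, h⟩)
    · exact le_trans h (Multiset.le_cons_self _ _)
    · calc t = a ::ₘ t.erase a := (Multiset.cons_erase ha).symm
        _ ≤ a ::ₘ s := Multiset.cons_le_cons _ h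

theorem Q_key_A (blocks : List String) (l : Char) (w : List Char) :
    Q blocks (l :: w) ↔ ∃ b ∈ blocks, l ∈ b.toList ∧ Q (blocks.erase b) w := by
  constructor
  · rintro ⟨t, hle, hrel⟩
    have hrel' : Multiset.Rel (fun c b => c ∈ b.toList) (l ::ₘ (w : Multiset Char)) t := hrel
    obtain ⟨b, t', hr, hrelw, rfl⟩ := Multiset.rel_cons_left.mp hrel'
    have hbt : b ∈ (blocks : Multiset String) :=
      Multiset.mem_of_le hle (Multiset.mem_cons_self _ _)
    refine ⟨b, by exact_mod_cast hbt, hr, t', ?_, hrelw⟩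
    have he := Multiset.erase_le_erase b hle
    rw [Multiset.erase_cons_head, Multiset.coe_erase] at he
    exact he
  · rintro ⟨b, hb, hlb, t', hle', hrel'⟩
    refine ⟨b ::ₘ t', ?_, ?_⟩
    · have hbm : b ∈ (blocks : Multiset String) := by exact_mod_cast hb
      rw [← Multiset.cons_erase hbm]
      refine Multiset.cons_le_cons _ ?_
      rwa [Multiset.coe_erase]
    · rw [← Multiset.cons_coe]
      exact Multiset.Rel.cons hlb hrel'

theorem Q_key_B (b : String) (bs : List String) (letters : List Char) :
    Q (b :: bs) letters ↔
      (∃ c ∈ letters, c ∈ b.toList ∧ Q bs (letters.erase c)) ∨ Q bs letters := by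
  constructor
  · rintro ⟨t, hle, hrel⟩
    have hle' : t ≤ b ::ₘ (bs : Multiset String) := hle
    rcases le_cons_split.mp hle' with h | ⟨hbt, het⟩
    · exact Or.inr ⟨t, h, hrel⟩
    · refine Or.inl ?_
      rw [← Multiset.cons_erase hbt] at hrel
      obtain ⟨c, s', hr, hrels, hs⟩ := Multiset.rel_cons_right.mp hrel
      have hcm : c ∈ (letters : Multiset Char) := hs ▸ Multiset.mem_cons_self _ _
      refine ⟨c, by exact_mod_cast hcm, hr, t.erase b, het, ?_⟩
      rw [← Multiset.coe_erase, hs, Multiset.erase_cons_head]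
      exact hrels
  · rintro (⟨c, hc, hcb, t', hle', hrel'⟩ | ⟨t, hle, hrel⟩)
    · refine ⟨b ::ₘ t', ?_, ?_⟩
      · rw [← Multiset.cons_coe]
        exact Multiset.cons_le_cons _ hle'
      · have hcm : c ∈ (letters : Multiset Char) := by exact_mod_cast hc
        have hsplit : (letters : Multiset Char) = c ::ₘ ((letters : Multiset Char).erase c) :=
          (Multiset.cons_erase hcm).symm
        rw [hsplit, Multiset.coe_erase]
        exact Multiset.Rel.cons hcb hrel'
    · exact ⟨t, le_trans hle (Multiset.le_cons_self _ _), hrel⟩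

theorem solveA_branch {l : Char} (w : List Char) {blocks : List String} {block : String}
    (hb : block ∈ blocks) :
    ((if PySem.Chars.isIn [l] block.toList then
        match PySem.List.remove? blocks block with
        | some b => solveAuxA w b
        | none => false
      else false) = true) ↔ l ∈ block.toList ∧ solveAuxA w (blocks.erase block) = true := by
  by_cases hi : PySem.Chars.isIn [l] block.toList = true
  · rw [if_pos hi, PySem.List.remove?_eq_some_erase blocks block hb]
    simp [(isIn_singleton l block.toList).mp hi]
  · rw [if_neg hi]
    simp only [Bool.false_eq_true, false_iff]
    rintro ⟨hl, -⟩
    exact hi ((isIn_singleton l block.toList).mpr hl)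

theorem goScan_branch {c : Char} {letters : List Char} (rest : List String) {block : String}
    (hc : c ∈ letters) :
    ((if PySem.Chars.isIn [c] block.toList then
        match h : PySem.List.remove? letters c with
        | some rem => goB rest rem
        | none => false
      else false) = true) ↔ c ∈ block.toList ∧ goB rest (letters.erase c) = true := by
  by_cases hi : PySem.Chars.isIn [c] block.toList = true
  · rw [if_pos hi]
    constructor
    · intro hp
      refine ⟨(isIn_singleton c block.toList).mp hi, ?_⟩
      revert hp
      split
      · next rem heq =>
        rw [PySem.List.remove?_eq_some_erase letters c hc] at heq
        cases heq
        exact fun hp => hp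
      · next heq =>
        exact absurd hc ((PySem.List.remove?_eq_none_iff letters c).mp heq)
    · rintro ⟨-, hg⟩
      split
      · next rem heq =>
        rw [PySem.List.remove?_eq_some_erase letters c hc] at heq
        cases heq
        exact hg
      · next heq =>
        exact absurd hc ((PySem.List.remove?_eq_none_iff letters c).mp heq)
  · rw [if_neg hi]
    simp only [Bool.false_eq_true, false_iff]
    rintro ⟨hl, -⟩
    exact hi ((isIn_singleton c block.toList).mpr hl)

theorem A_main : ∀ (w : List Char) (blocks : List String),
    solveAuxA w blocks = true ↔ Q blocks w := by
  intro w
  induction w with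
  | nil =>
    intro blocks
    simp only [solveAuxA, true_iff]
    exact Q_nil_letters blocks
  | cons l w ih =>
    intro blocks
    rw [solveAuxA, List.any_eq_true, Q_key_A]
    constructor
    · rintro ⟨block, hb, hp⟩
      obtain ⟨hl, hs⟩ := (solveA_branch w hb).mp hp
      exact ⟨block, hb, hl, (ih _).mp hs⟩
    · rintro ⟨block, hb, hl, hq⟩
      exact ⟨block, hb, (solveA_branch w hb).mpr ⟨hl, (ih _).mpr hq⟩⟩

theorem Q_count : ∀ (letters : List Char) (bs : List String), Q bs letters →
    ∀ c : Char, letters.count c ≤ bs.countP (fun b => PySem.Chars.isIn [c] b.toList) := by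
  intro letters
  induction letters with
  | nil => intro bs _ c; simp
  | cons l ls ih =>
    intro bs hq c
    obtain ⟨b, hb, hlb, hq'⟩ := (Q_key_A bs l ls).mp hq
    have ihc := ih (bs.erase b) hq' c
    obtain ⟨l1, l2, -, hbs, herase⟩ := List.exists_erase_eq hb
    rw [herase, List.countP_append] at ihc
    rw [hbs, List.countP_append, List.countP_cons, List.count_cons]
    by_cases hcl : c = l
    · subst hcl
      have hP : PySem.Chars.isIn [c] b.toList = true := (isIn_singleton c b.toList).mpr hlb
      simp [hP]
      omega
    · have hne : (l == c) = false := beq_eq_false_iff_ne.mpr (Ne.symm hcl)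
      simp [hne]
      split <;> omega

theorem B_main : ∀ (n : Nat) (letters : List Char), letters.length ≤ n →
    (∀ bs, goB bs letters = true ↔ Q bs letters) ∧
    (letters ≠ [] → ∀ bs, goScanB bs letters = true ↔ Q bs letters) := by
  intro n
  induction n with
  | zero =>
    intro letters hlen
    have hnil : letters = [] := List.length_eq_zero_iff.mp (Nat.le_zero.mp hlen)
    subst hnil
    exact ⟨fun bs => by simp only [goB, true_iff]; exact Q_nil_letters bs,
      fun h => absurd rfl h⟩
  | succ n ih =>
    intro letters hlen
    have hscan : letters ≠ [] → ∀ bs, goScanB bs letters = true ↔ Q bs letters := by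
      intro hne bs
      induction bs with
      | nil =>
        cases letters with
        | nil => exact absurd rfl hne
        | cons l ls => simp [goScanB, Q_nil_bs]
      | cons block rest ihbs =>
        have herase : ∀ c ∈ letters, (letters.erase c).length ≤ n := by
          intro c hc
          have h1 := List.length_erase_of_mem hc
          have h2 : 1 ≤ letters.length := List.length_pos_of_mem hc
          omega
        rw [goScanB, Bool.or_eq_true, List.any_eq_true, ihbs, Q_key_B]
        refine or_congr ?_ Iff.rfl
        constructor
        · rintro ⟨c, hc, hp⟩
          obtain ⟨hcb, hg⟩ := (goScan_branch rest hc).mp hp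
          exact ⟨c, hc, hcb, ((ih _ (herase c hc)).1 rest).mp hg⟩
        · rintro ⟨c, hc, hcb, hq⟩
          exact ⟨c, hc, (goScan_branch rest hc).mpr
            ⟨hcb, ((ih _ (herase c hc)).1 rest).mpr hq⟩⟩
    refine ⟨?_, hscan⟩
    intro bs
    cases letters with
    | nil => simp only [goB, true_iff]; exact Q_nil_letters bs
    | cons l ls =>
      rw [goB]
      exact hscan (by simp) bs

-- ===== VERDICT (by name: the statement is the Claim_ definition above) =====
theorem solve_spec : Claim_equal_solve := by
  unfold Claim_equal_solve Spec_solve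
  intro blocks word _
  have h1 := A_main word.toList blocks
  have h2 := ((B_main word.toList.length word.toList le_rfl).1 blocks)
  unfold solve solve_alt
  by_cases hbad :
      (word.toList.any (fun c =>
        decide (word.toList.count c >
          (blocks.countP (fun b => PySem.Chars.isIn [c] b.toList))))) = true
  · rw [if_pos hbad]
    obtain ⟨c, hc, hcount⟩ := List.any_eq_true.mp hbad
    have hgt := of_decide_eq_true hcount
    have hnq : ¬ Q blocks word.toList := fun hq =>
      absurd (Q_count word.toList blocks hq c) (by omega)
    cases hA : solveAuxA word.toList blocks
    · rfl
    · exact absurd (h1.mp hA) hnq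
  · rw [if_neg hbad]
    exact Bool.eq_iff_iff.mpr (h1.trans h2.symm)
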